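-- pv_equiv track=rewrite | github.com/Yzupnick/Lexographic_Sort | lex.py | lex_sort
-- ===== SOURCE A (Python) =====
-- def lex_sort(words, order, index = 0):
--     '''
--         lex_sort is a recursive algorithm.
--         :param words => list of words to sort
--         :param order =>  string of chars representing the lexographic order to sort the words into
--         :param index => the index on each word to start sorting from. Used internally for recursion
--     '''
--     # if our words to sort is 1 or less, we can just return the list
--     # this is our base case.
--     if len(words) <= 1:
--         return words
--
--     # we create a dictionary of char to int. The int is the bucket index used in our list of buckets
--     # that way we can easily reference which bucket to store a word in later
--     order_map = {char:index for index,char in enumerate(order)}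
--     # create the empty buckets. I'm pretty sure there is a way to do the next block of lines in a single list comprehensions... maybe two.
--     # that would be a bad idea for anyone who wants to read it.
--     buckets = [ [] for char in order]
--     to_return = []
--     for word in words:
--         # if the word is smaller than the index we are currently lookig at, we know it will come before anything that will be in our buckets.
--         # Therefore we can add it to our return list.
--         # We are also assuming here that words is correctly ordered for any word that doesn't make it into our buckets.
--         # This is only true if lex_sort was started with index of 0
--
--         if index >= len(word):
--             to_return.append(word)
--
--         # Otherwise we divide up our words into the buckets we created earlier, based on the current sort index
--         else:
--             sort_char = word[index]
--             buckets[order_map[sort_char]].append(word)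
--
--     # once we have our words sorted into buckets. We can sort those buckets using lex_sort on the next index.
--     # we can then append them together and return
--     for bucket in buckets:
--         to_return += lex_sort(bucket, order, index +1)
--     return to_return
-- ===== SOURCE B (Python) =====
-- def lex_sort(words, order, index=0):
--     # Staged filter passes per alphabet rank instead of one bucket-distribution
--     # pass: no bucket lists, no per-call mutation, ranks resolved via dict.get.
--     if len(words) <= 1:
--         return words
--     rank = {c: r for r, c in enumerate(order)}
--     result = [w for w in words if index >= len(w)]
--     for r in range(len(order)):
--         result += lex_sort([w for w in words
--                             if index < len(w) and rank.get(w[index]) == r],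
--                            order, index + 1)
--     return result
-- ===== Notes on version B (the rewrite author's own statement) =====
-- stated objective: alternative
-- what changed: A's single distribution pass into a mutable list of buckets (via an order_map dict lookup per word) is replaced by staged per-rank filter passes: B builds no buckets at all, instead recursing on a fresh list comprehension selecting the words of each alphabet rank in turn, with dict.get instead of indexing.
-- outside the precondition, e.g. on lex_sort(['ba', 'ca'], 'abc', -1): A returns ['ba', 'ca'], B returns ['ba', 'ca']; on lex_sort(['ax', 'b'], 'ab', 0): A returns ['ax', 'b'], B returns ['ax', 'b']
import Mathlib
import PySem

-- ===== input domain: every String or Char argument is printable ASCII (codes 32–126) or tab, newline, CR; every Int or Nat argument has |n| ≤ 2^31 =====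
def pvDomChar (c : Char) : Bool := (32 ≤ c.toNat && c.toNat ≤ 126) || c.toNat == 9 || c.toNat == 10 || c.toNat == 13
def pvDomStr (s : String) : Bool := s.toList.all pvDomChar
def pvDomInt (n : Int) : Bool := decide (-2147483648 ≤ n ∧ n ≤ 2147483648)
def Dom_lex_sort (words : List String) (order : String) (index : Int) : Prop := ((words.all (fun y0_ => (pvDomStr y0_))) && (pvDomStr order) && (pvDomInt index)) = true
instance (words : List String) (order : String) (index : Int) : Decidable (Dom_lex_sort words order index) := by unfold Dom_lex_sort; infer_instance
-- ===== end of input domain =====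

-- B replaces A's one-pass distribution into mutable buckets by staged per-rank
-- filter passes (no bucket lists; dict.get per filter); return values proved equal.

-- ===== PORT A =====
-- termination measure helpers (cited by the port's decreasing_by)
def pvF (i : Int) (w : String) : Nat := (PySem.Str.len w + 1 - i).toNat

def pvMu (ws : List String) (i : Int) : Nat := (ws.map (pvF i)).sum

-- buckets[j].append(w)  (j is in range whenever the Python does not raise)
def pvBucketAdd : List (List String) → Nat → String → List (List String)
  | [], _, _ => []
  | b :: bs, 0, w => (b ++ [w]) :: bs
  | b :: bs, j + 1, w => b :: pvBucketAdd bs j w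

-- order_map = {char: index for index, char in enumerate(order)}
def pvOrderMap (order : String) : PySem.Dict Char Int :=
  (PySem.List.enumerate order.toList).foldl (fun d p => d.insert p.2 p.1) PySem.Dict.empty

-- order_map[word[index]]  (KeyError/IndexError are outside Pre_; defaults never hit inside it)
def pvIdx (order : String) (i : Int) (w : String) : Nat :=
  (((pvOrderMap order).get? ((PySem.Str.pyGet? w i).getD ' ')).getD 0).toNat

-- the `for word in words` partition into to_return (short words) and buckets
def pvSplit (ws : List String) (order : String) (i : Int) :
    List String × List (List String) :=
  ws.foldl
    (fun acc w =>
      if PySem.Str.len w ≤ i then (acc.1 ++ [w], acc.2)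
      else (acc.1, pvBucketAdd acc.2 (pvIdx order i w) w))
    ([], order.toList.map (fun _ => []))

theorem pvMem_bucketAdd (w : String) :
    ∀ (l : List (List String)) (j : Nat) (b : List String),
      b ∈ pvBucketAdd l j w → b ∈ l ∨ ∃ a ∈ l, b = a ++ [w] := by
  intro l
  induction l with
  | nil => intro j b hb; simp [pvBucketAdd] at hb
  | cons x xs ih =>
    intro j b hb
    cases j with
    | zero =>
      simp [pvBucketAdd] at hb
      rcases hb with h | h
      · exact Or.inr ⟨x, by simp, h⟩
      · exact Or.inl (by simp [h])
    | succ j =>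
      simp [pvBucketAdd] at hb
      rcases hb with h | h
      · exact Or.inl (by simp [h])
      · rcases ih j b h with h' | ⟨a, ha, hfa⟩
        · exact Or.inl (by simp [h'])
        · exact Or.inr ⟨a, by simp [ha], hfa⟩

theorem pvSum_bucketAdd_le (g : List String → Nat) (w : String) (d : Nat)
    (hf : ∀ a, g (a ++ [w]) ≤ g a + d) :
    ∀ (l : List (List String)) (j : Nat),
      ((pvBucketAdd l j w).map g).sum ≤ (l.map g).sum + d := by
  intro l
  induction l with
  | nil => intro j; simp [pvBucketAdd]
  | cons x xs ih =>
    intro j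
    cases j with
    | zero => simp [pvBucketAdd]; have := hf x; omega
    | succ j => simp [pvBucketAdd]; have := ih j; omega

-- invariant of the partition fold: bucketed words are longer than i, and the
-- buckets' total measure grows by at most the measure of the words processed
theorem pvFold_facts (i : Int) (idx : String → Nat) :
    ∀ (ws : List String) (acc : List String × List (List String)),
      (∀ b ∈ acc.2, ∀ w ∈ b, i < PySem.Str.len w) →
      (∀ b ∈ (ws.foldl (fun acc w =>
          if PySem.Str.len w ≤ i then (acc.1 ++ [w], acc.2)
          else (acc.1, pvBucketAdd acc.2 (idx w) w)) acc).2,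
        ∀ w ∈ b, i < PySem.Str.len w) ∧
      ((ws.foldl (fun acc w =>
          if PySem.Str.len w ≤ i then (acc.1 ++ [w], acc.2)
          else (acc.1, pvBucketAdd acc.2 (idx w) w)) acc).2.map
            (fun b => pvMu b i)).sum ≤ (acc.2.map (fun b => pvMu b i)).sum + pvMu ws i := by
  intro ws
  induction ws with
  | nil => intro acc hacc; simpa [pvMu] using hacc
  | cons w ws ih =>
    intro acc hacc
    simp only [List.foldl_cons]
    by_cases hw : PySem.Str.len w ≤ i
    · rw [if_pos hw]
      have h := ih (acc.1 ++ [w], acc.2) hacc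
      dsimp only at h ⊢
      refine ⟨h.1, ?_⟩
      have : pvMu (w :: ws) i = pvF i w + pvMu ws i := by simp [pvMu]
      omega
    · rw [if_neg hw]
      have hlen : i < PySem.Str.len w := by omega
      have hmem : ∀ b ∈ pvBucketAdd acc.2 (idx w) w, ∀ u ∈ b, i < PySem.Str.len u := by
        intro b hb u hu
        rcases pvMem_bucketAdd w acc.2 (idx w) b hb with h' | ⟨a, ha, rfl⟩
        · exact hacc b h' u hu
        · rcases List.mem_append.mp hu with h'' | h''
          · exact hacc a ha u h''
          · simp at h''; subst h''; exact hlen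
      have h := ih (acc.1, pvBucketAdd acc.2 (idx w) w) hmem
      dsimp only at h ⊢
      refine ⟨h.1, ?_⟩
      have hsum : ((pvBucketAdd acc.2 (idx w) w).map (fun b => pvMu b i)).sum
          ≤ (acc.2.map (fun b => pvMu b i)).sum + pvF i w := by
        apply pvSum_bucketAdd_le
        intro a; simp [pvMu]
      have : pvMu (w :: ws) i = pvF i w + pvMu ws i := by simp [pvMu]
      omega

theorem pvSplit_bucket_len (ws : List String) (order : String) (i : Int) :
    ∀ b ∈ (pvSplit ws order i).2, ∀ w ∈ b, i < PySem.Str.len w := by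
  unfold pvSplit
  exact (pvFold_facts i (pvIdx order i) ws ([], order.toList.map (fun _ => [])) (by simp)).1

theorem pvSplit_mu_le (ws : List String) (order : String) (i : Int) :
    ((pvSplit ws order i).2.map (fun b => pvMu b i)).sum ≤ pvMu ws i := by
  unfold pvSplit
  have h := (pvFold_facts i (pvIdx order i) ws ([], order.toList.map (fun _ => [])) (by simp)).2
  have h0 : (((([] : List String), order.toList.map (fun _ => ([] : List String))).2.map
      (fun b => pvMu b i)).sum) = 0 := by
    dsimp only
    simp [pvMu]
  omega

theorem pvMu_succ (b : List String) (i : Int) (h : ∀ w ∈ b, i < PySem.Str.len w) :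
    pvMu b i = pvMu b (i + 1) + b.length := by
  induction b with
  | nil => simp [pvMu]
  | cons w ws ih =>
    have hw := h w (by simp)
    have hws := ih (fun u hu => h u (by simp [hu]))
    have hf : pvF i w = pvF (i + 1) w + 1 := by unfold pvF; omega
    simp [pvMu] at hws ⊢
    omega

theorem pvSplit_bucket_mu_le (ws : List String) (order : String) (i : Int)
    (b : List String) (hb : b ∈ (pvSplit ws order i).2) :
    pvMu b (i + 1) + b.length ≤ pvMu ws i := by
  have h1 : pvMu b i ≤ ((pvSplit ws order i).2.map (fun b => pvMu b i)).sum :=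
    List.single_le_sum (fun _ _ => Nat.zero_le _) _ (List.mem_map_of_mem hb)
  have h2 := pvSplit_mu_le ws order i
  have h3 := pvMu_succ b i (pvSplit_bucket_len ws order i b hb)
  omega

-- PORT A: literal transliteration of the recursive lex_sort
def lex_sort (words : List String) (order : String) (index : Int) : List String :=
  if words.length ≤ 1 then words
  else
    let p := pvSplit words order index
    p.2.attach.foldl (fun acc b => acc ++ lex_sort b.1 order (index + 1)) p.1
termination_by (pvMu words index, words.length)
decreasing_by
  rename_i hlen
  by_cases hb : (b : List String) = []
  · have hmu : pvMu (b : List String) (index + 1) = 0 := by rw [hb]; simp [pvMu]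
    rcases Nat.eq_zero_or_pos (pvMu words index) with h0 | h0
    · rw [hmu, h0]
      apply Prod.Lex.right
      rw [hb]
      simp only [List.length_nil]
      omega
    · apply Prod.Lex.left
      omega
  · have h := pvSplit_bucket_mu_le words order index b.1 b.2
    have h1 : 1 ≤ (b : List String).length := by
      cases hq : (b : List String) with
      | nil => exact absurd hq hb
      | cons _ _ => simp
    apply Prod.Lex.left
    omega

-- ===== PORT B =====
-- rank = {c: r for r, c in enumerate(order)}  (Source B builds its own dict)
def pvRank (order : String) : PySem.Dict Char Int :=
  (PySem.List.enumerate order.toList).foldl (fun d p => d.insert p.2 p.1) PySem.Dict.empty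

-- the comprehension  [w for w in words if index < len(w) and rank.get(w[index]) == r]
def pvSel (words : List String) (order : String) (index : Int) (r : Int) : List String :=
  words.filter (fun w => decide (index < PySem.Str.len w) &&
    ((pvRank order).get? ((PySem.Str.pyGet? w index).getD ' ') == some r))

-- weight of a frame, for termination of the staged recursion
def pvWt (i : Int) (ws : List String) : Nat :=
  (ws.map (fun w => (PySem.Str.len w + 1 - i).toNat)).sum

theorem pvWt_filter_lt (ws : List String) (p : String → Bool) (i : Int)
    (hlong : ∀ w ∈ ws, p w = true → i < PySem.Str.len w) (hws : 2 ≤ ws.length) :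
    Prod.Lex (· < · : Nat → Nat → Prop) (· < · : Nat → Nat → Prop)
      (pvWt (i + 1) (ws.filter p), (ws.filter p).length) (pvWt i ws, ws.length) := by
  have hwt : ∀ (l : List String) (j : Int), pvWt j l = pvMu l j := by
    intro l j
    simp only [pvWt, pvMu]
    refine congrArg List.sum (List.map_congr_left ?_)
    intro w _
    simp [pvF]
  have hsub : pvMu (ws.filter p) i ≤ pvMu ws i := by
    unfold pvMu
    exact ((List.filter_sublist (l := ws)).map (pvF i)).sum_le_sum (by simp)
  rcases eq_or_ne (ws.filter p) [] with hf | hf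
  · rcases Nat.eq_zero_or_pos (pvWt i ws) with h0 | h0
    · have h1 : pvWt (i + 1) (ws.filter p) = 0 := by rw [hf]; simp [pvWt]
      rw [h1, ← h0]
      exact Prod.Lex.right _ (by rw [hf]; simp only [List.length_nil]; omega)
    · exact Prod.Lex.left _ _ (by rw [hf]; simpa [pvWt] using h0)
  · have hmem : ∀ w ∈ ws.filter p, i < PySem.Str.len w := by
      intro w hw
      exact hlong w (List.mem_of_mem_filter hw) (List.of_mem_filter hw)
    have hsucc := pvMu_succ (ws.filter p) i hmem
    have hlen1 : 1 ≤ (ws.filter p).length := by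
      cases hq : ws.filter p with
      | nil => exact absurd hq hf
      | cons _ _ => simp
    apply Prod.Lex.left
    rw [hwt, hwt]
    omega

def lex_sort_alt (words : List String) (order : String) (index : Int) : List String :=
  if words.length ≤ 1 then words
  else
    (PySem.List.pyRange 0 (PySem.Str.len order) 1).foldl
      (fun result r => result ++ lex_sort_alt (pvSel words order index r) order (index + 1))
      (words.filter (fun w => decide (PySem.Str.len w ≤ index)))
termination_by (pvWt index words, words.length)
decreasing_by
  rename_i hlen
  unfold pvSel
  refine pvWt_filter_lt words _ index ?_ (by omega)
  intro w _ hp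
  simp only [Bool.and_eq_true, decide_eq_true_eq] at hp
  exact hp.1

-- ===== PRECONDITION & SPEC =====
-- Pre_ excludes inputs where A raises (KeyError on a word character missing from
-- `order` that the recursion inspects, IndexError from a too-negative index) and,
-- conservatively, all inputs of length ≥ 2 carrying a character missing from `order`
-- (whether A actually raises on those depends on bucket sizes along the recursion,
-- which is not a closed-form condition) as well as negative `index` (an internal
-- recursion parameter, never passed by the public call, relying on Python wraparound).
def Pre_lex_sort (words : List String) (order : String) (index : Int) : Prop :=
  words.length ≤ 1 ∨
    (0 ≤ index ∧
      (words.all (fun w =>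
        (w.toList.drop index.toNat).all (fun c => order.toList.contains c))) = true)
instance (words : List String) (order : String) (index : Int) :
    Decidable (Pre_lex_sort words order index) := by unfold Pre_lex_sort; infer_instance

def pvWitness_lex_sort : List String × String × Int := (["ba", "ab", "b"], "ab", 0)

def Spec_lex_sort (words : List String) (order : String) (index : Int) (out : List String) : Prop := out = lex_sort_alt words order index
instance (words : List String) (order : String) (index : Int) (out : List String) : Decidable (Spec_lex_sort words order index out) := by unfold Spec_lex_sort; infer_instance

-- ===== CLAIM (what is proved, stated in full; the proofs are below) =====
def Claim_equal_lex_sort : Prop := ∀ (words : List String) (order : String) (index : Int), Dom_lex_sort words order index → Pre_lex_sort words order index → Spec_lex_sort words order index (lex_sort words order index)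

-- ===== LEMMAS AND PROOFS =====
theorem pvFoldl_attach_append {α β : Type} (l : List α) (g : α → List β) (a : List β) :
    l.attach.foldl (fun acc x => acc ++ g x.1) a = a ++ l.flatMap g := by
  induction l generalizing a with
  | nil => simp
  | cons x xs ih => simp [List.attach_cons, List.foldl_map, ih]

theorem lex_sort_eq (words : List String) (order : String) (index : Int) :
    lex_sort words order index =
      if words.length ≤ 1 then words
      else (pvSplit words order index).1 ++
        (pvSplit words order index).2.flatMap (fun b => lex_sort b order (index + 1)) := by
  rw [lex_sort]
  by_cases h : words.length ≤ 1
  · simp [h]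
  · simp only [if_neg h]
    exact pvFoldl_attach_append (pvSplit words order index).2
      (fun b => lex_sort b order (index + 1)) (pvSplit words order index).1

theorem lex_sort_alt_eq (words : List String) (order : String) (index : Int) :
    lex_sort_alt words order index =
      if words.length ≤ 1 then words
      else (words.filter (fun w => decide (PySem.Str.len w ≤ index))) ++
        (PySem.List.pyRange 0 (PySem.Str.len order) 1).flatMap
          (fun r => lex_sort_alt (pvSel words order index r) order (index + 1)) := by
  rw [lex_sort_alt]
  by_cases h : words.length ≤ 1
  · simp [h]
  · simp only [if_neg h]
    exact PySem.List.foldl_append_eq_flatMap _ _ _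

theorem pvMapIdx_const {α β : Type} (l : List α) (g : Nat → β) :
    l.mapIdx (fun j _ => g j) = (List.range l.length).map g := by
  induction l generalizing g with
  | nil => simp
  | cons x xs ih =>
    rw [List.mapIdx_cons, List.length_cons, List.range_succ_eq_map]
    simp only [List.map_cons, List.map_map]
    exact congrArg _ (ih (fun j => g (j + 1)))

theorem pvMapIdx_id {α : Type} (l : List α) : l.mapIdx (fun _ a => a) = l := by
  induction l with
  | nil => simp
  | cons x xs ih => rw [List.mapIdx_cons]; simpa using ih

theorem pvBucketAdd_eq_mapIdx (w : String) :
    ∀ (l : List (List String)) (j : Nat),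
      pvBucketAdd l j w = l.mapIdx (fun k b => if k = j then b ++ [w] else b) := by
  intro l
  induction l with
  | nil => intro j; simp [pvBucketAdd]
  | cons x xs ih =>
    intro j
    cases j with
    | zero =>
      rw [List.mapIdx_cons]
      simp only [pvBucketAdd]
      congr 1
      have := pvMapIdx_id xs
      simpa using this.symm
    | succ j =>
      rw [List.mapIdx_cons]
      simp [pvBucketAdd, ih j]

theorem pvSplit_foldl_char (order : String) (i : Int) :
    ∀ (ws : List String) (S : List String) (B : List (List String)),
      ws.foldl (fun acc w => if PySem.Str.len w ≤ i then (acc.1 ++ [w], acc.2)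
        else (acc.1, pvBucketAdd acc.2 (pvIdx order i w) w)) (S, B)
      = (S ++ ws.filter (fun w => decide (PySem.Str.len w ≤ i)),
         B.mapIdx (fun j b => b ++ ws.filter (fun w =>
           decide (i < PySem.Str.len w) && decide (pvIdx order i w = j)))) := by
  intro ws
  induction ws with
  | nil =>
    intro S B
    simp only [List.foldl_nil, List.filter_nil, List.append_nil]
    rw [pvMapIdx_id]
  | cons w ws ih =>
    intro S B
    simp only [List.foldl_cons]
    by_cases hw : PySem.Str.len w ≤ i
    · rw [if_pos hw]
      rw [ih (S ++ [w]) B]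
      simp at hw
      refine congrArg₂ Prod.mk ?_ (List.mapIdx_eq_mapIdx_iff.mpr ?_)
      · rw [List.filter_cons_of_pos (by simp; omega)]
        simp
      · intro k hk
        rw [List.filter_cons_of_neg (by simp; omega)]
    · rw [if_neg hw]
      rw [ih S (pvBucketAdd B (pvIdx order i w) w)]
      simp at hw
      refine congrArg₂ Prod.mk ?_ ?_
      · rw [List.filter_cons_of_neg (by simp; omega)]
      · rw [pvBucketAdd_eq_mapIdx, List.mapIdx_mapIdx]
        refine List.mapIdx_eq_mapIdx_iff.mpr ?_
        intro k hk
        simp only [Function.comp_apply]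
        by_cases hkj : k = pvIdx order i w
        · rw [if_pos hkj]
          rw [List.filter_cons_of_pos (by simp [hkj]; omega)]
          simp
        · rw [if_neg hkj]
          rw [List.filter_cons_of_neg (by simp; omega)]

theorem pvSplit_eq (ws : List String) (order : String) (i : Int) :
    pvSplit ws order i =
      (ws.filter (fun w => decide (PySem.Str.len w ≤ i)),
       (List.range order.toList.length).map (fun j => ws.filter (fun w =>
         decide (i < PySem.Str.len w) && decide (pvIdx order i w = j)))) := by
  unfold pvSplit
  rw [pvSplit_foldl_char]
  refine congrArg₂ Prod.mk (by simp) ?_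
  have h1 : (order.toList.map (fun _ => ([] : List String))).mapIdx
        (fun j b => b ++ ws.filter (fun w =>
          decide (i < PySem.Str.len w) && decide (pvIdx order i w = j)))
      = (order.toList.map (fun _ => ([] : List String))).mapIdx
        (fun j _ => ws.filter (fun w =>
          decide (i < PySem.Str.len w) && decide (pvIdx order i w = j))) := by
    refine List.mapIdx_eq_mapIdx_iff.mpr ?_
    intro k hk
    simp
  rw [h1, pvMapIdx_const]
  simp

theorem pvEnumFold_get (cs : List Char) (c : Char) (hc : c ∈ cs) :
    ∃ k : Nat,
      ((PySem.List.enumerate cs 0).foldl (fun d p => d.insert p.2 p.1)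
        PySem.Dict.empty).get? c = some (k : Int) ∧ k < cs.length := by
  induction cs using List.reverseRecOn with
  | nil => simp at hc
  | append_singleton l a ih =>
    rw [PySem.List.enumerate_append, List.foldl_append]
    have he : PySem.List.enumerate [a] (0 + (l.length : Int)) = [((l.length : Int), a)] := by
      rw [PySem.List.enumerate_cons]
      simp [PySem.List.enumerate_nil]
    rw [he]
    simp only [List.foldl_cons, List.foldl_nil]
    by_cases hca : c = a
    · subst hca
      exact ⟨l.length, PySem.Dict.get?_insert_self _ _ _, by simp⟩
    · have hcl : c ∈ l := by
        rcases List.mem_append.mp hc with h | h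
        · exact h
        · simp at h; exact absurd h hca
      rcases ih hcl with ⟨k, hk, hkl⟩
      refine ⟨k, ?_, by simp; omega⟩
      rw [PySem.Dict.get?_insert_of_ne _ _ hca]
      exact hk

theorem pvSel_eq_filterA (ws : List String) (order : String) (i : Int) (j : Nat)
    (h0 : 0 ≤ i)
    (hpres : ∀ w ∈ ws, ∀ c ∈ w.toList.drop i.toNat, c ∈ order.toList) :
    pvSel ws order i ((j : Nat) : Int) = ws.filter (fun w =>
      decide (i < PySem.Str.len w) && decide (pvIdx order i w = j)) := by
  unfold pvSel
  refine List.filter_congr ?_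
  intro w hw
  by_cases hlw : i < PySem.Str.len w
  · obtain ⟨n, rfl⟩ : ∃ n : Nat, ((n : Nat) : Int) = i := ⟨i.toNat, Int.toNat_of_nonneg h0⟩
    simp only [Int.toNat_natCast] at hpres ⊢
    have hilen : n < w.toList.length := by
      rw [String.length_toList]
      simp [PySem.Str.len_eq] at hlw
      exact_mod_cast hlw
    have hget : PySem.Str.pyGet? w ((n : Nat) : Int) = some (w.toList[n]) := by
      simp [PySem.List.pyGet?_natCast]
    have hdlen : 0 < (w.toList.drop n).length := by rw [List.length_drop]; omega
    have hgd : (w.toList.drop n)[0]'hdlen = w.toList[n] := by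
      simp [List.getElem_drop]
    have hcmem : w.toList[n] ∈ w.toList.drop n := hgd ▸ List.getElem_mem hdlen
    have hco := hpres w hw _ hcmem
    rcases pvEnumFold_get order.toList _ hco with ⟨k, hk, _⟩
    have hd : decide (((n : Nat) : Int) < PySem.Str.len w) = true := decide_eq_true hlw
    rw [hd]
    simp only [Bool.true_and, pvIdx, pvOrderMap, pvRank, hget, Option.getD_some, hk,
      Int.toNat_natCast]
    by_cases hkj : k = j
    · simp [hkj]
    · have hb : ((k : Int) == (j : Int)) = false := by
        simp only [beq_eq_false_iff_ne, ne_eq, Nat.cast_inj]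
        omega
      simp [hb, hkj]
  · have hd : decide (i < PySem.Str.len w) = false := decide_eq_false hlw
    rw [hd]
    simp

theorem pvAgree : ∀ (n : Nat) (ws : List String) (order : String) (i : Int),
    2 * pvMu ws i + ws.length ≤ n → 0 ≤ i →
    (∀ w ∈ ws, ∀ c ∈ w.toList.drop i.toNat, c ∈ order.toList) →
    lex_sort ws order i = lex_sort_alt ws order i := by
  intro n
  induction n with
  | zero =>
    intro ws order i hfuel h0 hpres
    have hnil : ws = [] := by
      cases ws with
      | nil => rfl
      | cons x xs => simp at hfuel
    subst hnil
    rw [lex_sort_eq, lex_sort_alt_eq]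
    simp
  | succ n ih =>
    intro ws order i hfuel h0 hpres
    rw [lex_sort_eq, lex_sort_alt_eq]
    by_cases hl : ws.length ≤ 1
    · rw [if_pos hl, if_pos hl]
    · rw [if_neg hl, if_neg hl]
      rw [pvSplit_eq]
      refine congrArg₂ (· ++ ·) rfl ?_
      have hR : PySem.List.pyRange 0 (PySem.Str.len order) 1
          = (List.range order.toList.length).map (fun k => ((0 : Int) + (k : Nat))) := by
        rw [PySem.List.pyRange_one]
        simp [PySem.Str.len_eq]
      rw [hR, List.flatMap_map, List.flatMap_map]
      refine List.flatMap_congr ?_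
      intro j hj
      have hz : ((0 : Int) + (j : Nat)) = ((j : Nat) : Int) := by omega
      rw [hz, pvSel_eq_filterA ws order i j h0 hpres]
      set f := ws.filter (fun w => decide (i < PySem.Str.len w) && decide (pvIdx order i w = j)) with hfdef
      have hmemf : ∀ w ∈ f, i < PySem.Str.len w := by
        intro w hwf
        have := List.of_mem_filter hwf
        simp only [Bool.and_eq_true, decide_eq_true_eq] at this
        exact this.1
      have hsub : pvMu f i ≤ pvMu ws i := by
        unfold pvMu
        exact ((List.filter_sublist (l := ws)).map (pvF i)).sum_le_sum (by simp)
      have hsucc := pvMu_succ f i hmemf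
      refine ih f order (i + 1) (by omega) (by omega) ?_
      intro w hwf c hc
      have hito : (i + 1).toNat = i.toNat + 1 := by omega
      rw [hito] at hc
      have hc' : c ∈ w.toList.drop i.toNat := by
        have : List.drop 1 (List.drop i.toNat w.toList) = List.drop (i.toNat + 1) w.toList := by
          rw [List.drop_drop]
        rw [← this] at hc
        exact List.drop_subset 1 _ hc
      exact hpres w (List.mem_of_mem_filter hwf) c hc' 

-- ===== VERDICT (by name: the statement is the Claim_ definition above) =====
theorem lex_sort_spec : Claim_equal_lex_sort := by
  intro words order index _ hpre
  unfold Spec_lex_sort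
  rcases hpre with hl | ⟨h0, hp⟩
  · rw [lex_sort_eq, lex_sort_alt_eq, if_pos hl, if_pos hl]
  · refine pvAgree (2 * pvMu words index + words.length) words order index le_rfl h0 ?_
    intro w hw c hc
    have h1 := (List.all_eq_true.mp hp) w hw
    have h2 := (List.all_eq_true.mp h1) c hc
    simpa using h2
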